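-- pv_equiv track=rewrite | github.com/szmbthydmnk/project_euler_solutions | python/p_098.py | is_valid_mapping
-- ===== SOURCE A (Python) =====
-- def is_valid_mapping(word, square):
--     s = str(square)
--     if len(word) != len(s):
--         return None
--
--     mapping = {}
--     used_digits = {}
--
--     for ch, digit in zip(word, s):
--         if ch in mapping:
--             if mapping[ch] != digit:
--                 return None
--         else:
--             if digit in used_digits:
--                 return None
--             mapping[ch] = digit
--             used_digits[digit] = ch
--
--     if mapping[word[0]] == '0':
--         return None
--
--     return mapping
-- ===== SOURCE B (Python) =====
-- def is_valid_mapping(word, square):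
--     s = str(square)
--     if len(word) != len(s):
--         return None
--     pairs = list(zip(word, s))
--     if not all((c1 == c2) == (d1 == d2) for (c1, d1) in pairs for (c2, d2) in pairs):
--         return None
--     if s[0] == '0':
--         return None
--     return dict(pairs)
-- ===== Notes on version B (the rewrite author's own statement) =====
-- stated objective: simpler
-- what changed: Replaces A's incremental two-dict (mapping/used_digits) consistency loop with a global pairwise consistency test over zip(word, str(square)) plus a one-shot dict(zip) construction.
import Mathlib
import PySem

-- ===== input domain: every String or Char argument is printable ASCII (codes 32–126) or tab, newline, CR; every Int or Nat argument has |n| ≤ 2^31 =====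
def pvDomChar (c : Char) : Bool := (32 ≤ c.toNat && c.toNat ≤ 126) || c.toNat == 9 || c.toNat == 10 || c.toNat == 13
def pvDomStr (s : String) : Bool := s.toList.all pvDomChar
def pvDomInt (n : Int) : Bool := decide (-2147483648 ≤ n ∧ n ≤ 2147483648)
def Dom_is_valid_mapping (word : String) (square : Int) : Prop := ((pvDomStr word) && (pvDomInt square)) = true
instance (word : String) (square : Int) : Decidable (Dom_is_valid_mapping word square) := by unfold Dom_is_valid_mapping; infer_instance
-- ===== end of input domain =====

-- B replaces A's incremental two-dict consistency loop with a global pairwise consistency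
-- test over zip(word, str(square)) plus a one-shot dict(pairs) construction (objective: simpler).

-- ===== PORT A =====
-- A's loop over zip(word, s); the Python dicts 'mapping' and 'used_digits' (1-char-string keys
-- and values) are modeled over Char and converted to one-char strings at the return boundary.
def isvmLoop (zl : List (Char × Char)) (mapping used : PySem.Dict Char Char) :
    Option (PySem.Dict Char Char) :=
  match zl with
  | [] => some mapping
  | (ch, d) :: rest =>
    match mapping.get? ch with
    | some v => if v = d then isvmLoop rest mapping used else none
    | none =>
      if used.contains d then none
      else isvmLoop rest (mapping.insert ch d) (used.insert d ch)


-- the loop result feeds A's final leading-zero check; the '[] => none' and KeyError branches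
-- below are unreachable (lengths are equal, str(square) is nonempty, the loop maps every char)
def is_valid_mapping (word : String) (square : Int) : Option (List (String × String)) :=
  let s := PySem.Int.toStr square
  if PySem.Str.len word ≠ PySem.Str.len s then none
  else
    match isvmLoop (word.toList.zip s.toList) PySem.Dict.empty PySem.Dict.empty with
    | none => none
    | some mapping =>
      match word.toList with
      | [] => none
      | c0 :: _ =>
        match mapping.get? c0 with
        | none => none
        | some v =>
          if v = '0' then none
          else some (mapping.items.map (fun p => (p.1.toString, p.2.toString)))

-- ===== PORT B =====
-- Source B: pairwise consistency test over the zip, then leading-zero test, then dict(pairs).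
def is_valid_mapping_alt (word : String) (square : Int) : Option (List (String × String)) :=
  let s := PySem.Int.toStr square
  if PySem.Str.len word ≠ PySem.Str.len s then none
  else
    let pairs := word.toList.zip s.toList
    if ¬ (pairs.all (fun p => pairs.all (fun q => ((p.1 == q.1) == (p.2 == q.2))))) then none
    else if s.toList.head? = some '0' then none
    else
      some ((pairs.foldl (fun d p => d.insert p.1 p.2) PySem.Dict.empty).items.map
              (fun p => (p.1.toString, p.2.toString)))

-- ===== PRECONDITION & SPEC =====
def Spec_is_valid_mapping (word : String) (square : Int) (out : Option (List (String × String))) : Prop := out = is_valid_mapping_alt word square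
instance (word : String) (square : Int) (out : Option (List (String × String))) : Decidable (Spec_is_valid_mapping word square out) := by unfold Spec_is_valid_mapping; infer_instance

-- ===== CLAIM (what is proved, stated in full; the proofs are below) =====
def Claim_equal_is_valid_mapping : Prop := ∀ (word : String) (square : Int), Dom_is_valid_mapping word square → Spec_is_valid_mapping word square (is_valid_mapping word square)

-- ===== LEMMAS AND PROOFS =====

lemma toChars_ne_nil (n : Int) : PySem.Int.toChars n ≠ [] := by
  unfold PySem.Int.toChars
  split
  · simp
  · have : 0 < (Nat.toDigits 10 n.toNat).length := Nat.length_toDigits_pos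
    intro h; simp [h] at this

lemma map_overwrite_of_mem (l : List (Char × Char)) (k v : Char)
    (hnd : (l.map Prod.fst).Nodup) (hmem : (k, v) ∈ l) :
    l.map (fun p => if p.1 == k then (k, v) else p) = l := by
  induction l with
  | nil => rfl
  | cons p t ih =>
    simp only [List.map_cons, List.nodup_cons] at hnd
    rcases List.mem_cons.mp hmem with heq | hmt
    · subst heq
      have hnone : ∀ x ∈ t, (x.1 == k) = false := by
        intro x hx
        simp only [beq_eq_false_iff_ne, ne_eq]
        intro hxk
        exact hnd.1 (by simpa [hxk] using List.mem_map_of_mem (f := Prod.fst) hx)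
      simp only [List.map_cons, beq_self_eq_true, if_true]
      congr 1
      calc t.map (fun p => if p.1 == k then (k, v) else p)
          = t.map id := List.map_congr_left (fun x hx => by rw [hnone x hx]; simp)
        _ = t := List.map_id _
    · have hpk : (p.1 == k) = false := by
        simp only [beq_eq_false_iff_ne, ne_eq]
        intro hpk
        exact hnd.1 (by simpa [hpk] using List.mem_map_of_mem (f := Prod.fst) hmt)
      simp only [List.map_cons, hpk, Bool.false_eq_true, if_false]
      congr 1
      exact ih hnd.2 hmt

lemma dict_insert_get_self (d : PySem.Dict Char Char) (k v : Char)
    (hnd : d.keys.Nodup) (h : d.get? k = some v) : d.insert k v = d := by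
  apply PySem.Dict.ext
  have hc : d.contains k = true := by rw [PySem.Dict.contains_eq_isSome_get?, h]; rfl
  rw [PySem.Dict.items_insert_of_contains (h := hc)]
  exact map_overwrite_of_mem d.items k v (by simpa [PySem.Dict.keys] using hnd)
    (PySem.Dict.mem_items_of_get?_eq_some _ h)

lemma get?_foldl_insert (l : List (Char × Char)) (m : PySem.Dict Char Char) (k v : Char)
    (h1 : ∀ x, (k, x) ∈ l → x = v) (h2 : (k, v) ∈ l ∨ m.get? k = some v) :
    (l.foldl (fun d p => d.insert p.1 p.2) m).get? k = some v := by
  induction l generalizing m with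
  | nil =>
    rcases h2 with h | h
    · simp at h
    · simpa using h
  | cons p t ih =>
    simp only [List.foldl_cons]
    apply ih
    · exact fun x hx => h1 x (List.mem_cons_of_mem _ hx)
    by_cases hk : k = p.1
    · right
      have : p.2 = v := h1 p.2 (by rw [hk]; exact List.mem_cons_self)
      rw [hk, PySem.Dict.get?_insert_self, this]
    · rcases h2 with h | h
      · rcases List.mem_cons.mp h with heq | hmt
        · exact absurd (congrArg Prod.fst heq) hk
        · exact Or.inl hmt
      · right; rw [PySem.Dict.get?_insert_of_ne _ _ hk]; exact h

lemma cons_consistent (c d : Char) (rest : List (Char × Char))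
    (h1 : ∀ p ∈ rest, ∀ q ∈ rest, (p.1 = q.1 ↔ p.2 = q.2))
    (hcross : ∀ q ∈ rest, (c = q.1 ↔ d = q.2)) :
    ∀ p ∈ (c, d) :: rest, ∀ q ∈ (c, d) :: rest, (p.1 = q.1 ↔ p.2 = q.2) := by
  intro p hp q hq
  rcases List.mem_cons.mp hp with rfl | hp' <;> rcases List.mem_cons.mp hq with rfl | hq'
  · exact ⟨fun _ => rfl, fun _ => rfl⟩
  · exact hcross q hq'
  · exact ⟨fun h => ((hcross p hp').mp h.symm).symm, fun h => ((hcross p hp').mpr h.symm).symm⟩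
  · exact h1 p hp' q hq'

lemma isvmLoop_eq (zl : List (Char × Char)) :
    ∀ (m u : PySem.Dict Char Char), m.keys.Nodup → u.keys.Nodup →
    (∀ c d, m.get? c = some d ↔ u.get? d = some c) →
    isvmLoop zl m u =
      if (∀ p ∈ zl, ∀ q ∈ zl, (p.1 = q.1 ↔ p.2 = q.2)) ∧
         (∀ p ∈ zl, m.get? p.1 = some p.2 ∨ (m.get? p.1 = none ∧ u.get? p.2 = none))
      then some (zl.foldl (fun d p => d.insert p.1 p.2) m) else none := by
  induction zl with
  | nil =>
    intro m u hm hu hmu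
    simp [isvmLoop]
  | cons hd rest ih =>
    intro m u hm hu hmu
    obtain ⟨c, d⟩ := hd
    cases hmc : m.get? c with
    | some v =>
      by_cases hvd : v = d
      · subst hvd
        have hlhs : isvmLoop ((c, v) :: rest) m u = isvmLoop rest m u := by
          simp [isvmLoop, hmc]
        rw [hlhs, ih m u hm hu hmu]
        have hfold : ((c, v) :: rest).foldl (fun d p => d.insert p.1 p.2) m
            = rest.foldl (fun d p => d.insert p.1 p.2) m := by
          rw [List.foldl_cons, dict_insert_get_self m c v hm hmc]
        have hcross : (∀ p ∈ rest, ∀ q ∈ rest, (p.1 = q.1 ↔ p.2 = q.2)) →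
            (∀ p ∈ rest, m.get? p.1 = some p.2 ∨ (m.get? p.1 = none ∧ u.get? p.2 = none)) →
            ∀ q ∈ rest, (c = q.1 ↔ v = q.2) := by
          intro h1 h2 q hq
          rcases h2 q hq with hcase | ⟨hn1, hn2⟩
          · constructor
            · intro h; rw [← h, hmc] at hcase; exact Option.some.inj hcase
            · intro h
              have ha := (hmu q.1 q.2).mp hcase
              have hb := (hmu c v).mp hmc
              rw [← h, hb] at ha; exact Option.some.inj ha
          · constructor
            · intro h; rw [← h, hmc] at hn1; cases hn1
            · intro h; have hb := (hmu c v).mp hmc; rw [← h, hb] at hn2; cases hn2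
        have hiff :
            ((∀ p ∈ (c, v) :: rest, ∀ q ∈ (c, v) :: rest, (p.1 = q.1 ↔ p.2 = q.2)) ∧
             (∀ p ∈ (c, v) :: rest, m.get? p.1 = some p.2 ∨ (m.get? p.1 = none ∧ u.get? p.2 = none)))
            ↔
            ((∀ p ∈ rest, ∀ q ∈ rest, (p.1 = q.1 ↔ p.2 = q.2)) ∧
             (∀ p ∈ rest, m.get? p.1 = some p.2 ∨ (m.get? p.1 = none ∧ u.get? p.2 = none))) := by
          constructor
          · rintro ⟨h1, h2⟩
            exact ⟨fun p hp q hq => h1 p (List.mem_cons_of_mem _ hp) q (List.mem_cons_of_mem _ hq),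
                   fun p hp => h2 p (List.mem_cons_of_mem _ hp)⟩
          · rintro ⟨h1, h2⟩
            refine ⟨cons_consistent c v rest h1 (hcross h1 h2), ?_⟩
            intro p hp
            rcases List.mem_cons.mp hp with rfl | hp'
            · exact Or.inl hmc
            · exact h2 p hp'
        rw [hfold]
        simp only [hiff]
      · have hlhs : isvmLoop ((c, d) :: rest) m u = none := by
          simp [isvmLoop, hmc, hvd]
        rw [hlhs, if_neg]
        rintro ⟨h1, h2⟩
        rcases h2 (c, d) List.mem_cons_self with h | ⟨hn, _⟩
        · rw [hmc] at h; exact hvd (Option.some.inj h)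
        · rw [hmc] at hn; cases hn
    | none =>
      cases huc : u.contains d with
      | true =>
        have hus : (u.get? d).isSome = true := by
          rw [← PySem.Dict.contains_eq_isSome_get?]; exact huc
        have hlhs : isvmLoop ((c, d) :: rest) m u = none := by
          simp [isvmLoop, hmc, huc]
        rw [hlhs, if_neg]
        rintro ⟨h1, h2⟩
        rcases h2 (c, d) List.mem_cons_self with h | ⟨_, hn2⟩
        · rw [hmc] at h; cases h
        · rw [hn2] at hus; cases hus
      | false =>
        have hud : u.get? d = none := by
          have := PySem.Dict.contains_eq_isSome_get? (d := u) (k := d)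
          rw [huc] at this
          exact Option.not_isSome_iff_eq_none.mp (by rw [← this]; simp)
        have hlhs : isvmLoop ((c, d) :: rest) m u
            = isvmLoop rest (m.insert c d) (u.insert d c) := by
          simp [isvmLoop, hmc, huc]
        have hm' : (m.insert c d).keys.Nodup := PySem.Dict.nodup_keys_insert _ _ _ hm
        have hu' : (u.insert d c).keys.Nodup := PySem.Dict.nodup_keys_insert _ _ _ hu
        have hmu' : ∀ x y, (m.insert c d).get? x = some y ↔ (u.insert d c).get? y = some x := by
          intro x y
          constructor
          · intro h
            by_cases hx : x = c
            · subst hx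
              rw [PySem.Dict.get?_insert_self] at h
              rw [← Option.some.inj h, PySem.Dict.get?_insert_self]
            · rw [PySem.Dict.get?_insert_of_ne _ _ hx] at h
              have := (hmu x y).mp h
              by_cases hy : y = d
              · subst hy; rw [hud] at this; cases this
              · rw [PySem.Dict.get?_insert_of_ne _ _ hy]; exact this
          · intro h
            by_cases hy : y = d
            · subst hy
              rw [PySem.Dict.get?_insert_self] at h
              rw [← Option.some.inj h, PySem.Dict.get?_insert_self]
            · rw [PySem.Dict.get?_insert_of_ne _ _ hy] at h
              have := (hmu x y).mpr h
              by_cases hx : x = c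
              · subst hx; rw [hmc] at this; cases this
              · rw [PySem.Dict.get?_insert_of_ne _ _ hx]; exact this
        rw [hlhs, ih (m.insert c d) (u.insert d c) hm' hu' hmu']
        have hiff :
            ((∀ p ∈ (c, d) :: rest, ∀ q ∈ (c, d) :: rest, (p.1 = q.1 ↔ p.2 = q.2)) ∧
             (∀ p ∈ (c, d) :: rest, m.get? p.1 = some p.2 ∨ (m.get? p.1 = none ∧ u.get? p.2 = none)))
            ↔
            ((∀ p ∈ rest, ∀ q ∈ rest, (p.1 = q.1 ↔ p.2 = q.2)) ∧
             (∀ p ∈ rest, (m.insert c d).get? p.1 = some p.2 ∨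
               ((m.insert c d).get? p.1 = none ∧ (u.insert d c).get? p.2 = none))) := by
          constructor
          · rintro ⟨h1, h2⟩
            refine ⟨fun p hp q hq => h1 p (List.mem_cons_of_mem _ hp) q (List.mem_cons_of_mem _ hq), ?_⟩
            intro q hq
            by_cases hq1 : q.1 = c
            · left
              have hq2 : q.2 = d :=
                (h1 q (List.mem_cons_of_mem _ hq) (c, d) List.mem_cons_self).mp hq1
              rw [hq1, PySem.Dict.get?_insert_self, hq2]
            · rcases h2 q (List.mem_cons_of_mem _ hq) with hcase | ⟨hn1, hn2⟩
              · left; rw [PySem.Dict.get?_insert_of_ne _ _ hq1]; exact hcase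
              · right
                have hq2 : q.2 ≠ d := fun h =>
                  hq1 ((h1 q (List.mem_cons_of_mem _ hq) (c, d) List.mem_cons_self).mpr h)
                rw [PySem.Dict.get?_insert_of_ne _ _ hq1, PySem.Dict.get?_insert_of_ne _ _ hq2]
                exact ⟨hn1, hn2⟩
          · rintro ⟨h1, h2⟩
            have hcross : ∀ q ∈ rest, (c = q.1 ↔ d = q.2) := by
              intro q hq
              rcases h2 q hq with hcase | ⟨hn1, hn2⟩
              · constructor
                · intro h; rw [← h, PySem.Dict.get?_insert_self] at hcase
                  exact Option.some.inj hcase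
                · intro h
                  have := (hmu' q.1 q.2).mp hcase
                  rw [← h, PySem.Dict.get?_insert_self] at this
                  exact Option.some.inj this
              · constructor
                · intro h; rw [← h, PySem.Dict.get?_insert_self] at hn1; cases hn1
                · intro h; rw [← h, PySem.Dict.get?_insert_self] at hn2; cases hn2
            refine ⟨cons_consistent c d rest h1 hcross, ?_⟩
            intro p hp
            rcases List.mem_cons.mp hp with rfl | hp'
            · exact Or.inr ⟨hmc, hud⟩
            · by_cases hp1 : p.1 = c
              · right
                have hp2 : p.2 = d := ((hcross p hp').mp hp1.symm).symm
                rw [hp1, hp2]; exact ⟨hmc, hud⟩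
              · rcases h2 p hp' with hcase | ⟨hn1, hn2⟩
                · left; rw [PySem.Dict.get?_insert_of_ne _ _ hp1] at hcase; exact hcase
                · right
                  have hp2 : p.2 ≠ d := fun h => hp1 ((hcross p hp').mpr h.symm).symm
                  rw [PySem.Dict.get?_insert_of_ne _ _ hp1] at hn1
                  rw [PySem.Dict.get?_insert_of_ne _ _ hp2] at hn2
                  exact ⟨hn1, hn2⟩
        rw [List.foldl_cons]
        simp only [hiff]

lemma is_valid_mapping_eq_alt (word : String) (square : Int) :
    is_valid_mapping word square = is_valid_mapping_alt word square := by
  by_cases hlen : PySem.Str.len word = PySem.Str.len (PySem.Int.toStr square)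
  case neg =>
    simp only [is_valid_mapping, is_valid_mapping_alt]
    rw [if_pos hlen, if_pos hlen]
  case pos =>
    -- both strings are nonempty here: str(square) always has a char, and the lengths are equal
    have hs : (PySem.Int.toStr square).toList ≠ [] := by
      rw [PySem.Int.toList_toStr]; exact toChars_ne_nil square
    have hlen' : word.toList.length = (PySem.Int.toStr square).toList.length := by
      have := hlen; rw [PySem.Str.len_eq, PySem.Str.len_eq] at this; exact_mod_cast this
    have hw : word.toList ≠ [] := by
      intro h0; rw [h0] at hlen'
      exact hs (List.eq_nil_of_length_eq_zero hlen'.symm)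
    obtain ⟨c0, wrest, hwl⟩ := List.exists_cons_of_ne_nil hw
    obtain ⟨d0, srest, hsl⟩ := List.exists_cons_of_ne_nil hs
    simp only [is_valid_mapping, is_valid_mapping_alt]
    rw [if_neg (fun h => h hlen), if_neg (fun h => h hlen)]
    set zl := word.toList.zip (PySem.Int.toStr square).toList with hzldef
    have hzl : zl = (c0, d0) :: wrest.zip srest := by rw [hzldef, hwl, hsl]; rfl
    have hC2 : ∀ p ∈ zl, (PySem.Dict.empty (κ := Char) (ν := Char)).get? p.1 = some p.2 ∨
        ((PySem.Dict.empty (κ := Char) (ν := Char)).get? p.1 = none ∧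
         (PySem.Dict.empty (κ := Char) (ν := Char)).get? p.2 = none) :=
      fun p _ => Or.inr ⟨PySem.Dict.get?_empty _, PySem.Dict.get?_empty _⟩
    have hloop := isvmLoop_eq zl PySem.Dict.empty PySem.Dict.empty
      PySem.Dict.nodup_keys_empty PySem.Dict.nodup_keys_empty
      (by intro c d; simp [PySem.Dict.get?_empty])
    have hall : (zl.all (fun p => zl.all (fun q => ((p.1 == q.1) == (p.2 == q.2))))) = true
        ↔ (∀ p ∈ zl, ∀ q ∈ zl, (p.1 = q.1 ↔ p.2 = q.2)) := by
      simp [List.all_eq_true]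
    have hhead : ((PySem.Int.toStr square).toList.head? = some '0') ↔ (d0 = '0') := by
      rw [hsl]; simp
    by_cases hC1 : ∀ p ∈ zl, ∀ q ∈ zl, (p.1 = q.1 ↔ p.2 = q.2)
    · rw [if_pos ⟨hC1, hC2⟩] at hloop
      have hget : ((zl.foldl (fun d p => d.insert p.1 p.2) PySem.Dict.empty)).get? c0
          = some d0 := by
        apply get?_foldl_insert
        · intro x hx
          exact (hC1 (c0, x) hx (c0, d0) (by rw [hzl]; exact List.mem_cons_self)).mp rfl
        · left; rw [hzl]; exact List.mem_cons_self
      rw [hloop, hwl, if_neg (not_not_intro (hall.mpr hC1))]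
      dsimp only
      rw [hget]
      dsimp only
      by_cases hz : d0 = '0'
      · rw [if_pos (hhead.mpr hz), if_pos hz]
      · rw [if_neg (fun h => hz (hhead.mp h)), if_neg hz]
    · rw [if_neg (fun h => hC1 h.1)] at hloop
      have hallfalse :
          ¬ ((zl.all (fun p => zl.all (fun q => ((p.1 == q.1) == (p.2 == q.2))))) = true) :=
        fun h => hC1 (hall.mp h)
      rw [hloop, if_pos hallfalse]

-- ===== VERDICT (by name: the statement is the Claim_ definition above) =====
theorem is_valid_mapping_spec : Claim_equal_is_valid_mapping := by
  intro word square _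
  unfold Spec_is_valid_mapping
  exact is_valid_mapping_eq_alt word square
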